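-- pv_equiv track=rewrite | github.com/SamuelNarciso/Analizador_Sintactico | write.py | CheckContenido
-- ===== SOURCE A (Python) =====
-- def CheckContenido(data):
--     if '"' in data or "'" in data:
--         comillas=['"',"'"]
--         if data[0] in comillas and data[len(data)-1] in comillas and data[0]==data[len(data)-1]:
--             num_comillas=0
--             for x in data:
--                 if x==data[0]:
--                     num_comillas+=1
--             if num_comillas==2:
--                 return True
--
--     else:
--         #check if is a number
--         pass
--     return False
-- ===== SOURCE B (Python) =====
-- import re
--
-- _QUOTED = re.compile(r'"[^"]*"|\'[^\']*\'')
--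
-- def CheckContenido(data):
--     return bool(_QUOTED.fullmatch(data))
-- ===== Notes on version B (the rewrite author's own statement) =====
-- stated objective: idiomatic
-- what changed: Replaces the membership guard, endpoint comparisons and quote-counting loop with a single regular-expression fullmatch accepting exactly the strings that start and end with the same quote character and contain no further occurrence of that quote between them.
import Mathlib
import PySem

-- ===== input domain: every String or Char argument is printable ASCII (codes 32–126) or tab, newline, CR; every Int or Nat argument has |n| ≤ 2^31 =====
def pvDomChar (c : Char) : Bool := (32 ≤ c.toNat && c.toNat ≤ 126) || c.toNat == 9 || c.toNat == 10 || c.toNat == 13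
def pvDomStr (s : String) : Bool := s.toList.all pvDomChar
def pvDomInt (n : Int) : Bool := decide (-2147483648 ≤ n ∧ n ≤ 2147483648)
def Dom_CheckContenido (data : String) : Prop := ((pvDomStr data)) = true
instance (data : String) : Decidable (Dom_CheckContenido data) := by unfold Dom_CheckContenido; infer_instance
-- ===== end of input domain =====

-- B replaces A's membership guard, endpoint tests and quote-counting loop with a single
-- regex fullmatch (same quote at both ends, none of that quote inside); idiomatic, same cost.


-- ===== PORT A =====
def CheckContenido (data : String) : Bool :=
  let cs := data.toList
  if cs.contains '"' || cs.contains '\'' then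
    -- data[0] and data[len(data)-1]; the none branches are unreachable (the guard forces data ≠ "")
    match PySem.List.pyGet? cs 0, PySem.List.pyGet? cs ((cs.length : Int) - 1) with
    | some c0, some cl =>
      if (c0 == '"' || c0 == '\'') && ((cl == '"' || cl == '\'') && c0 == cl) then
        -- num_comillas accumulation loop
        let num : Int := cs.foldl (fun n x => if x == c0 then n + 1 else n) 0
        if num == 2 then true else false
      else false
    | _, _ => false
  else false

-- ===== PORT B =====
-- literal scan of the regex tail: every char before the last must differ from q,
-- the last char must be q (exact port of what re.fullmatch checks for this pattern)
def pvScanQuoted (q : Char) : List Char → Bool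
  | [] => false
  | [d] => d == q
  | e :: f :: more => e != q && pvScanQuoted q (f :: more)

def CheckContenido_alt (data : String) : Bool :=
  match data.toList with
  | [] => false
  | c :: rest => (c == '"' && pvScanQuoted '"' rest) || (c == '\'' && pvScanQuoted '\'' rest)

-- ===== PRECONDITION & SPEC =====
def Spec_CheckContenido (data : String) (out : Bool) : Prop := out = CheckContenido_alt data
instance (data : String) (out : Bool) : Decidable (Spec_CheckContenido data out) := by unfold Spec_CheckContenido; infer_instance

-- ===== CLAIM (what is proved, stated in full; the proofs are below) =====
def Claim_equal_CheckContenido : Prop := ∀ (data : String), Dom_CheckContenido data → Spec_CheckContenido data (CheckContenido data)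

-- ===== LEMMAS AND PROOFS =====
lemma foldl_count (q : Char) (cs : List Char) (n : Int) :
    cs.foldl (fun n x => if x = q then n + 1 else n) n = n + cs.count q := by
  induction cs generalizing n with
  | nil => simp
  | cons x xs ih =>
    simp only [List.foldl_cons, List.count_cons, ih]
    by_cases h : x = q <;> simp [h] <;> push_cast <;> ring

lemma scan_iff (q : Char) (rest : List Char) :
    pvScanQuoted q rest = true ↔ rest.getLast? = some q ∧ rest.count q = 1 := by
  induction rest with
  | nil => simp [pvScanQuoted]
  | cons d tl ih =>
    cases tl with
    | nil =>
      by_cases h : d = q <;> simp [pvScanQuoted, h]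
    | cons e tl' =>
      have hlast : (d :: e :: tl').getLast? = (e :: tl').getLast? := by
        simp [List.getLast?_cons_cons]
      by_cases h : d = q
      · constructor
        · intro hs; simp [pvScanQuoted, h] at hs
        · rintro ⟨h1, h2⟩
          rw [hlast] at h1
          have hmem : q ∈ e :: tl' := List.mem_of_getLast? h1
          have hpos : 0 < (e :: tl').count q := List.count_pos_iff.mpr hmem
          rw [List.count_cons] at h2
          simp [h] at h2
          omega
      · rw [show pvScanQuoted q (d :: e :: tl') = (d != q && pvScanQuoted q (e :: tl')) from rfl,
          List.count_cons]
        simp [h, hlast, ih]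

theorem CheckContenido_spec : Claim_equal_CheckContenido := by
  intro data _
  unfold Spec_CheckContenido CheckContenido CheckContenido_alt
  cases hcs : data.toList with
  | nil => simp
  | cons c rest =>
    simp only [PySem.List.pyGet?_zero_cons]
    have hlen : ((c :: rest).length : Int) - 1 = (rest.length : Int) := by
      simp
    rw [hlen, PySem.List.pyGet?_natCast]
    cases rest with
    | nil =>
      -- single-character string: A's count is 1, not 2; B's scan of the empty tail fails
      simp only [pvScanQuoted]
      by_cases h1 : c = '"' <;> by_cases h2 : c = '\'' <;>
        simp [h1, h2]
    | cons d tl =>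
      have hget : (c :: d :: tl)[(d :: tl).length]? = (d :: tl).getLast? := by
        rw [List.getLast?_eq_getElem?]; simp; rfl
      rw [hget]
      have hne : d :: tl ≠ [] := by simp
      obtain ⟨cl, hcl⟩ := List.getLast?_isSome.mpr hne |> Option.isSome_iff_exists.mp
      rw [hcl]
      have hclmem : cl ∈ d :: tl := List.mem_of_getLast? hcl
      rw [Bool.eq_iff_iff]
      simp only [Bool.or_eq_true, Bool.and_eq_true, beq_iff_eq, List.contains_eq_mem,
        decide_eq_true_eq, List.mem_cons, scan_iff, hcl, Option.some_inj]
      constructor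
      · intro hA
        split_ifs at hA with hg hq hn
        · obtain ⟨hcq, hclq, hecl⟩ := hq
          subst hecl
          rw [foldl_count, List.count_cons] at hn
          simp at hn
          have hcnt : (d :: tl).count c = 1 := by omega
          rcases hcq with h | h <;> subst h
          · exact Or.inl ⟨rfl, rfl, hcnt⟩
          · exact Or.inr ⟨rfl, rfl, hcnt⟩
        all_goals exact absurd hA (by simp)
      · rintro (⟨hq, hlast, hcnt⟩ | ⟨hq, hlast, hcnt⟩) <;> subst hq <;> subst hlast <;>
          split_ifs with hg hq hn
        · rfl
        · exfalso; rw [foldl_count, List.count_cons] at hn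
          simp [hcnt] at hn
        · exact absurd ⟨Or.inl rfl, Or.inl rfl, rfl⟩ hq
        · exact absurd (Or.inl (Or.inl rfl)) hg
        · rfl
        · exfalso; rw [foldl_count, List.count_cons] at hn
          simp [hcnt] at hn
        · exact absurd ⟨Or.inr rfl, Or.inr rfl, rfl⟩ hq
        · exact absurd (Or.inr (Or.inl rfl)) hg
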